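-- pv_equiv track=rewrite | github.com/Neshri/Introspection | evolving_graphs/agent_graph/writer_agent.py | generate_deps_summary
-- ===== SOURCE A (Python) =====
-- from collections import defaultdict
--
-- def generate_deps_summary(interactions: list, external_imports: set) -> str:
--     """
--     Generates the 'Dependency Interactions' summary deterministically from structured data.
--     """
--     lines = []
--
--     if interactions:
--         grouped_interactions = defaultdict(list)
--         for call in interactions:
--             grouped_interactions[call['target_module']].append(call['symbol'])
--
--         lines.append("- Direct interactions with other modules in this project:")
--         for module, symbols in sorted(grouped_interactions.items()):
--             unique_symbols = sorted(list(set(symbols)))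
--             symbols_str = ", ".join([f"`{s}`" for s in unique_symbols])
--             lines.append(f"  - Uses symbols from `{module}`: {symbols_str}.")
--
--     if external_imports:
--         lines.append("- Direct interactions with external libraries:")
--         for lib in sorted(list(external_imports)):
--             lines.append(f"  - Imports and uses the `{lib}` library.")
--
--     if not lines:
--         return "This module has no direct interactions with other project modules or external libraries."
--
--     return "\n".join(lines)
-- ===== SOURCE B (Python) =====
-- from itertools import groupby
--
--
-- def generate_deps_summary(interactions: list, external_imports: set) -> str:
--     """
--     Generates the 'Dependency Interactions' summary deterministically from structured data.
--     Sort-then-group decomposition: sort the interaction records by target module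
--     (a new list, the input is not mutated), then group the sorted stream.
--     """
--     lines = []
--
--     if interactions:
--         lines.append("- Direct interactions with other modules in this project:")
--         by_module = lambda call: call['target_module']
--         for module, group in groupby(sorted(interactions, key=by_module), key=by_module):
--             symbols_str = ", ".join(f"`{s}`" for s in sorted({call['symbol'] for call in group}))
--             lines.append(f"  - Uses symbols from `{module}`: {symbols_str}.")
--
--     if external_imports:
--         lines.append("- Direct interactions with external libraries:")
--         for lib in sorted(external_imports):
--             lines.append(f"  - Imports and uses the `{lib}` library.")
--
--     return "\n".join(lines) if lines else "This module has no direct interactions with other project modules or external libraries."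
-- ===== Notes on version B (the rewrite author's own statement) =====
-- stated objective: alternative
-- what changed: Replaces A's defaultdict index-then-sort-the-keys grouping by a sort-the-records-then-group-the-sorted-stream decomposition (sorted + itertools.groupby), with the lines emitted by comprehension-style construction instead of append loops.
import Mathlib
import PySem

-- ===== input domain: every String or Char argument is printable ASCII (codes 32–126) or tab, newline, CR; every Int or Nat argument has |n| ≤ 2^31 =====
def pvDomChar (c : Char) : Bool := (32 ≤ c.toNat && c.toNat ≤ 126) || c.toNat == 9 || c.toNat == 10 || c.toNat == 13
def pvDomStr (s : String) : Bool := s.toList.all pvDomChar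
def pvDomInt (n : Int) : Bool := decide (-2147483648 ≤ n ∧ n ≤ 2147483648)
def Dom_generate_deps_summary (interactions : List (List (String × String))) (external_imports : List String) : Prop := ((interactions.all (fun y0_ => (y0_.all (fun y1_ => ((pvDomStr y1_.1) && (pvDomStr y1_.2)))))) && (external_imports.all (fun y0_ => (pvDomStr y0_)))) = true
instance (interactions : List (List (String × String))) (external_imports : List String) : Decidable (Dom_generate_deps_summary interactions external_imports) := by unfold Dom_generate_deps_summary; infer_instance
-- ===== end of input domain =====

-- B replaces A's defaultdict-grouping-then-sorted-keys by sort-the-records-then-group-the-sorted-stream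
-- (objective: alternative decomposition, same asymptotic cost). Return-value equivalence only; neither program mutates its arguments.

-- ===== PORT A =====
-- call['k'] totalized with "" (the KeyError case is excluded by Pre_); shared by both ports.
def pvLookup (call : List (String × String)) (k : String) : String :=
  ((PySem.Dict.mk call).get? k).getD ""

-- the two fields the calls are read by: call['target_module'] and call['symbol']
def pvKey (c : List (String × String)) : String := pvLookup c "target_module"
def pvSym (c : List (String × String)) : String := pvLookup c "symbol"

def generate_deps_summary (interactions : List (List (String × String))) (external_imports : List String) : String :=
  let lines : List String := []
  let lines :=
    if interactions.isEmpty then lines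
    else
      let grouped : PySem.Dict String (List String) :=
        interactions.foldl
          (fun d call => d.modify (pvKey call) [] (fun l => l ++ [pvSym call]))
          PySem.Dict.empty
      let lines := lines ++ ["- Direct interactions with other modules in this project:"]
      -- sorted(grouped.items()): dict keys are distinct, so Python's pair comparison only ever reads the key — sorting by the key is exact
      (PySem.List.sorted grouped.items (fun p => p.1) false).foldl
        (fun lines p =>
          let uniqueSymbols := PySem.List.sorted (PySem.Set.ofList p.2) (fun s => s) false
          let symbolsStr := PySem.Str.join ", " (uniqueSymbols.map (fun s => "`" ++ s ++ "`"))
          lines ++ ["  - Uses symbols from `" ++ p.1 ++ "`: " ++ symbolsStr ++ "."])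
        lines
  let lines :=
    if external_imports.isEmpty then lines
    else
      let lines := lines ++ ["- Direct interactions with external libraries:"]
      (PySem.List.sorted external_imports (fun s => s) false).foldl
        (fun lines lib => lines ++ ["  - Imports and uses the `" ++ lib ++ "` library."]) lines
  if lines.isEmpty then
    "This module has no direct interactions with other project modules or external libraries."
  else PySem.Str.join "\n" lines

-- ===== PORT B =====
-- itertools.groupby over a module-sorted stream: one run per maximal block of equal keys.
def pvGroupRun (xs : List (List (String × String))) : List (String × List String) :=
  match xs with
  | [] => []
  | c :: rest =>
      let m := pvKey c
      (m, (c :: rest.takeWhile (fun d => pvKey d == m)).map pvSym)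
        :: pvGroupRun (rest.dropWhile (fun d => pvKey d == m))
termination_by xs.length
decreasing_by
  simpa using Nat.lt_succ_of_le (List.length_dropWhile_le _ _)

def generate_deps_summary_alt (interactions : List (List (String × String))) (external_imports : List String) : String :=
  let projectLines : List String :=
    if interactions.isEmpty then []
    else
      "- Direct interactions with other modules in this project:" ::
      (pvGroupRun (PySem.List.sorted interactions pvKey false)).map
        (fun g =>
          "  - Uses symbols from `" ++ g.1 ++ "`: " ++
            PySem.Str.join ", "
              ((PySem.List.sorted (PySem.Set.ofList g.2) (fun s => s) false).map
                (fun s => "`" ++ s ++ "`")) ++ ".")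
  let externalLines : List String :=
    if external_imports.isEmpty then []
    else
      "- Direct interactions with external libraries:" ::
      (PySem.List.sorted external_imports (fun s => s) false).map
        (fun lib => "  - Imports and uses the `" ++ lib ++ "` library.")
  let lines := projectLines ++ externalLines
  if lines.isEmpty then
    "This module has no direct interactions with other project modules or external libraries."
  else PySem.Str.join "\n" lines

-- ===== PRECONDITION & SPEC =====
-- Pre_ excludes exactly the inputs where A raises KeyError: a call dict missing 'target_module' or 'symbol'.
def Pre_generate_deps_summary (interactions : List (List (String × String))) (external_imports : List String) : Prop :=
  ∀ call ∈ interactions,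
    (PySem.Dict.mk call).contains "target_module" = true ∧ (PySem.Dict.mk call).contains "symbol" = true
instance (interactions : List (List (String × String))) (external_imports : List String) : Decidable (Pre_generate_deps_summary interactions external_imports) := by unfold Pre_generate_deps_summary; infer_instance

def pvWitness_generate_deps_summary : (List (List (String × String))) × List String :=
  ([[("target_module", "pkg.util"), ("symbol", "helper")]], ["numpy"])

def Spec_generate_deps_summary (interactions : List (List (String × String))) (external_imports : List String) (out : String) : Prop := out = generate_deps_summary_alt interactions external_imports
instance (interactions : List (List (String × String))) (external_imports : List String) (out : String) : Decidable (Spec_generate_deps_summary interactions external_imports out) := by unfold Spec_generate_deps_summary; infer_instance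

-- ===== CLAIM (what is proved, stated in full; the proofs are below) =====
def Claim_equal_generate_deps_summary : Prop := ∀ (interactions : List (List (String × String))) (external_imports : List String), Dom_generate_deps_summary interactions external_imports → Pre_generate_deps_summary interactions external_imports → Spec_generate_deps_summary interactions external_imports (generate_deps_summary interactions external_imports)

-- ===== LEMMAS AND PROOFS =====

lemma ofList_perm {α : Type} [BEq α] [LawfulBEq α] {xs ys : List α} (h : xs.Perm ys) :
    (PySem.Set.ofList xs).Perm (PySem.Set.ofList ys) := by
  rw [List.perm_ext_iff_of_nodup (PySem.Set.nodup_ofList xs) (PySem.Set.nodup_ofList ys)]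
  intro a
  simp [PySem.Set.mem_ofList, h.mem_iff]

lemma sortedSet_perm {xs ys : List String} (h : xs.Perm ys) :
    PySem.List.sorted (PySem.Set.ofList xs) (fun s => s) false
      = PySem.List.sorted (PySem.Set.ofList ys) (fun s => s) false :=
  PySem.List.sorted_eq_sorted_of_perm _ _ _ (fun _ _ hab => hab) (ofList_perm h)

-- A's sorted dict items, in canonical form
lemma A_items_sorted (interactions : List (List (String × String))) :
    PySem.List.sorted
      (interactions.foldl
        (fun d call => d.modify (pvKey call) [] (fun l => l ++ [pvSym call]))
        PySem.Dict.empty).items (fun p => p.1) false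
    = (PySem.List.sorted (PySem.Set.ofList (interactions.map pvKey)) (fun s => s) false).map
        (fun k => (k, (interactions.filter (fun c => pvKey c == k)).map pvSym)) := by
  set d := interactions.foldl
        (fun d call => d.modify (pvKey call) [] (fun l => l ++ [pvSym call]))
        PySem.Dict.empty with hd
  have hkeys : d.keys = PySem.Set.ofList (interactions.map pvKey) := by
    rw [hd, PySem.Dict.keys_foldl_modify_key]
    simp [PySem.Dict.keys_empty, PySem.Set.update_nil_left]
  have hnd : d.keys.Nodup := by
    rw [hd]
    exact PySem.Dict.nodup_keys_foldl_modify_key _ _ _ _ _ (by simp [PySem.Dict.keys_empty])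
  have hgetD : ∀ k, d.getD k [] = (interactions.filter (fun c => pvKey c == k)).map pvSym := by
    intro k
    have hfold : d = (interactions.map (fun c => (pvKey c, pvSym c))).foldl
        (fun d p => d.modify p.1 [] (fun l => l ++ [p.2])) PySem.Dict.empty := by
      rw [hd, List.foldl_map]
    rw [hfold, PySem.Dict.getD_foldl_modify_append]
    simp [PySem.Dict.getD_empty, List.filter_map, List.map_map, Function.comp_def]
  have hitems : d.items = (PySem.Set.ofList (interactions.map pvKey)).map
      (fun k => (k, (interactions.filter (fun c => pvKey c == k)).map pvSym)) := by
    rw [PySem.Dict.items_eq_map_keys d hnd []]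
    rw [hkeys]
    exact List.map_congr_left (fun k _ => by rw [hgetD])
  apply PySem.List.sorted_eq_of_perm_of_pairwise_lt
  · rw [hitems]
    exact (PySem.List.sorted_perm _ _ _).map _
  · rw [List.pairwise_map]
    exact PySem.List.sorted_ofList_pairwise_lt _

-- after dropping the leading run of key m from a ≥-m sorted list, all keys exceed m
lemma dropWhile_key_gt (m : String) (l : List (List (String × String)))
    (h1 : ∀ d ∈ l, m ≤ pvKey d) (h2 : l.Pairwise (fun a b => pvKey a ≤ pvKey b)) :
    ∀ d ∈ l.dropWhile (fun d => pvKey d == m), m < pvKey d := by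
  induction l with
  | nil => simp
  | cons a t ih =>
    rw [List.dropWhile_cons]
    by_cases ha : pvKey a == m
    · rw [if_pos ha]
      exact ih (fun d hd => h1 d (List.mem_cons_of_mem _ hd)) (List.pairwise_cons.mp h2).2
    · rw [if_neg ha]
      have hlt : m < pvKey a :=
        lt_of_le_of_ne (h1 a (List.mem_cons_self)) (fun he => ha (by simp [← he]))
      intro d hd
      rcases List.mem_cons.mp hd with he | hdt
      · exact he ▸ hlt
      · exact lt_of_lt_of_le hlt ((List.pairwise_cons.mp h2).1 d hdt)

-- B's groupby over a key-sorted stream, in the same canonical form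
lemma groupRun_eq (ys : List (List (String × String)))
    (h : ys.Pairwise (fun a b => pvKey a ≤ pvKey b)) :
    pvGroupRun ys
      = (PySem.List.sorted (PySem.Set.ofList (ys.map pvKey)) (fun s => s) false).map
          (fun k => (k, (ys.filter (fun c => pvKey c == k)).map pvSym)) := by
  revert h
  induction ys using pvGroupRun.induct with
  | case1 =>
    intro _
    simp [pvGroupRun, PySem.List.sorted]
  | case2 c rest m ih =>
    intro h
    have hmc : m = pvKey c := rfl
    clear_value m
    subst hmc
    have hpc := List.pairwise_cons.mp h
    have hgrp : ∀ d ∈ rest.takeWhile (fun d => pvKey d == pvKey c), pvKey d = pvKey c := by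
      intro d hd
      simpa using List.mem_takeWhile_imp hd
    have hgt : ∀ d ∈ rest.dropWhile (fun d => pvKey d == pvKey c), pvKey c < pvKey d :=
      dropWhile_key_gt (pvKey c) rest hpc.1 hpc.2
    have hsplit : rest.takeWhile (fun d => pvKey d == pvKey c)
        ++ rest.dropWhile (fun d => pvKey d == pvKey c) = rest :=
      List.takeWhile_append_dropWhile
    have hpw' : (rest.dropWhile (fun d => pvKey d == pvKey c)).Pairwise
        (fun a b => pvKey a ≤ pvKey b) :=
      hpc.2.sublist (List.dropWhile_sublist _)
    have ihe := ih hpw'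
    have hm : PySem.List.sorted (PySem.Set.ofList ((c :: rest).map pvKey)) (fun s => s) false
        = pvKey c :: PySem.List.sorted
            (PySem.Set.ofList ((rest.dropWhile (fun d => pvKey d == pvKey c)).map pvKey))
            (fun s => s) false := by
      apply PySem.List.sorted_eq_of_perm_of_pairwise_lt
      · refine (List.perm_ext_iff_of_nodup ?_ (PySem.Set.nodup_ofList _)).mpr ?_
        · refine List.nodup_cons.mpr ⟨?_, ((PySem.List.sorted_perm _ _ _).nodup_iff).mpr
            (PySem.Set.nodup_ofList _)⟩
          intro hmem
          have : pvKey c ∈ (rest.dropWhile (fun d => pvKey d == pvKey c)).map pvKey := by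
            simpa [PySem.List.mem_sorted, PySem.Set.mem_ofList] using hmem
          rcases List.mem_map.mp this with ⟨d, hd, he⟩
          exact (hgt d hd).ne' he
        · intro a
          simp only [List.mem_cons, PySem.List.mem_sorted, PySem.Set.mem_ofList, List.mem_map]
          constructor
          · rintro (rfl | ⟨d, hd, rfl⟩)
            · exact ⟨c, Or.inl rfl, rfl⟩
            · exact ⟨d, Or.inr ((List.dropWhile_sublist _).mem hd), rfl⟩
          · rintro ⟨d, hd, rfl⟩
            rcases hd with rfl | hd
            · exact Or.inl rfl
            · rw [← hsplit] at hd
              rcases List.mem_append.mp hd with hd | hd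
              · exact Or.inl (hgrp d hd)
              · exact Or.inr ⟨d, hd, rfl⟩
      · refine List.pairwise_cons.mpr ⟨?_, PySem.List.sorted_ofList_pairwise_lt _⟩
        intro k hk
        have hk' : k ∈ (rest.dropWhile (fun d => pvKey d == pvKey c)).map pvKey := by
          simpa [PySem.List.mem_sorted, PySem.Set.mem_ofList] using hk
        rcases List.mem_map.mp hk' with ⟨d, hd, rfl⟩
        exact hgt d hd
    have hfilter : (c :: rest).filter (fun c' => pvKey c' == pvKey c)
        = c :: rest.takeWhile (fun d => pvKey d == pvKey c) := by
      rw [List.filter_cons_of_pos (by simp)]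
      congr 1
      conv_lhs => rw [← hsplit]
      rw [List.filter_append,
        List.filter_eq_self.mpr (fun d hd => by simp [hgrp d hd]),
        List.filter_eq_nil_iff.mpr (fun d hd => by simpa using (hgt d hd).ne'),
        List.append_nil]
    simp only [pvGroupRun]
    rw [hm]
    simp only [List.map_cons]
    rw [hfilter, ihe]
    congr 1
    apply List.map_congr_left
    intro k hk
    have hk' : k ∈ (rest.dropWhile (fun d => pvKey d == pvKey c)).map pvKey := by
      simpa [PySem.List.mem_sorted, PySem.Set.mem_ofList] using hk
    rcases List.mem_map.mp hk' with ⟨d, hd, rfl⟩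
    have hkm : pvKey d ≠ pvKey c := (hgt d hd).ne'
    have hfilter2 : (c :: rest).filter (fun c' => pvKey c' == pvKey d)
        = (rest.dropWhile (fun d => pvKey d == pvKey c)).filter (fun c' => pvKey c' == pvKey d) := by
      rw [List.filter_cons_of_neg (by simpa using fun he => hkm he.symm)]
      conv_lhs => rw [← hsplit]
      rw [List.filter_append,
        List.filter_eq_nil_iff.mpr (fun e he => by simpa [hgrp e he] using fun hh => hkm hh.symm),
        List.nil_append]
    rw [hfilter2]

lemma ports_eq (interactions : List (List (String × String))) (external_imports : List String) :
    generate_deps_summary interactions external_imports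
      = generate_deps_summary_alt interactions external_imports := by
  simp only [generate_deps_summary, generate_deps_summary_alt]
  have hmain :
      (PySem.List.sorted
          (interactions.foldl
            (fun d call => d.modify (pvKey call) [] (fun l => l ++ [pvSym call]))
            PySem.Dict.empty).items (fun p => p.1) false).map
        (fun p =>
          "  - Uses symbols from `" ++ p.1 ++ "`: " ++
            PySem.Str.join ", "
              ((PySem.List.sorted (PySem.Set.ofList p.2) (fun s => s) false).map
                (fun s => "`" ++ s ++ "`")) ++ ".")
      = (pvGroupRun (PySem.List.sorted interactions pvKey false)).map
          (fun g =>
            "  - Uses symbols from `" ++ g.1 ++ "`: " ++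
              PySem.Str.join ", "
                ((PySem.List.sorted (PySem.Set.ofList g.2) (fun s => s) false).map
                  (fun s => "`" ++ s ++ "`")) ++ ".") := by
    rw [A_items_sorted, groupRun_eq _ (PySem.List.sorted_pairwise interactions pvKey),
      sortedSet_perm ((PySem.List.sorted_perm interactions pvKey false).map pvKey),
      List.map_map, List.map_map]
    apply List.map_congr_left
    intro k hk
    simp only [Function.comp]
    rw [sortedSet_perm (((PySem.List.sorted_perm interactions pvKey false).filter _).map pvSym)]
  simp only [PySem.List.foldl_append_singleton_eq_map]
  rw [hmain]
  by_cases hI : interactions.isEmpty <;> by_cases hE : external_imports.isEmpty <;>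
    simp [hI, hE]

-- ===== VERDICT (by name: the statement is the Claim_ definition above) =====
theorem generate_deps_summary_spec : Claim_equal_generate_deps_summary := by
  intro interactions external_imports _ _
  unfold Spec_generate_deps_summary
  exact ports_eq interactions external_imports
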